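-- pv_equiv track=rewrite | github.com/Team-pizza-D/Course-Registration-System | test 2.py | has_sequence
-- ===== SOURCE A (Python) =====
-- def has_sequence(chars, length=3):
--     digits = [int(c) for c in chars if c.isdigit()]
--     if len(digits) < length:
--         return False
--
--     streak = 1
--     for i in range(1, len(digits)):
--         if digits[i] == digits[i - 1] + 1:
--             streak += 1
--             if streak >= length:
--                 return True
--         else:
--             streak = 1
--     return False
-- ===== SOURCE B (Python) =====
-- def has_sequence(chars, length=3):
--     digits = [int(c) for c in chars if c.isdigit()]
--     if len(digits) < length:
--         return False
--     # A run of digits each one more than the last is exactly a window of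
--     # 0,1,...,9; so search the digit list for any fixed consecutive pattern
--     # of size max(length, 2) (a confirmed sequence needs at least one step).
--     size = max(length, 2)
--     if size > 10:
--         return False
--     for start in range(0, 11 - size):
--         pattern = list(range(start, start + size))
--         for i in range(len(digits) - size + 1):
--             if digits[i:i + size] == pattern:
--                 return True
--     return False
-- ===== Notes on version B (the rewrite author's own statement) =====
-- stated objective: alternative
-- what changed: Replaces A's stateful streak-counter scan by pattern search: since an increasing-by-one digit run is exactly a window cut from 0..9, B checks whether any of the fixed consecutive patterns of size max(length,2) occurs as a slice of the digit list.
import Mathlib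
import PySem

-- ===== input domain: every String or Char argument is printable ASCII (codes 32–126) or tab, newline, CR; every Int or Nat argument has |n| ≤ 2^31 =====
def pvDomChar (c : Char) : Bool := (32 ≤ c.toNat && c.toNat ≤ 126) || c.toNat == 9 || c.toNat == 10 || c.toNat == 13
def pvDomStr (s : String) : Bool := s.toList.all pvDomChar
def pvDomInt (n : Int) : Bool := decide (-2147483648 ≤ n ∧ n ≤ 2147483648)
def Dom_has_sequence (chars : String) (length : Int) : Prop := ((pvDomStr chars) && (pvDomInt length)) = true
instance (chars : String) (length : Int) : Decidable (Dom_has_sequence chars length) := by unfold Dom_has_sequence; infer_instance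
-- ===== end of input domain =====

-- B replaces A's streak-counter scan by searching the digit list for any of the
-- nine fixed consecutive patterns cut from 0..9 (pattern matching instead of a
-- stateful scan); same cost class, proved to return the same Bool on the whole domain.

-- ===== PORT A =====
-- [int(c) for c in chars if c.isdigit()]; int(c) on a digit char is its code minus 48 (exact on ASCII digits)
def pvDigits (chars : String) : List Int :=
  (chars.toList.filter (fun c => PySem.Chars.isdigit c)).map (fun c => (c.toNat : Int) - 48)

def has_sequence (chars : String) (length : Int) : Bool :=
  let digits := pvDigits chars
  if (digits.length : Int) < length then false
  else
    -- for i in range(1, len(digits)): early return modelled by the found flag in the state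
    ((PySem.List.pyRange 1 (digits.length) 1).foldl
      (fun (st : Bool × Int) i =>
        if st.1 then st
        else if PySem.List.pyGetD digits i 0 == PySem.List.pyGetD digits (i - 1) 0 + 1 then
          (if st.2 + 1 ≥ length then (true, st.2 + 1) else (false, st.2 + 1))
        else (false, 1))
      (false, 1)).1

-- ===== PORT B =====
def has_sequence_alt (chars : String) (length : Int) : Bool :=
  let digits := pvDigits chars
  if (digits.length : Int) < length then false
  else
    let size := max length 2
    if size > 10 then false
    else
      -- for start in range(0, 11 - size): pattern = list(range(start, start + size)); early
      -- returns modelled by any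
      (PySem.List.pyRange 0 (11 - size) 1).any (fun start =>
        let pattern := PySem.List.pyRange start (start + size) 1
        (PySem.List.pyRange 0 ((digits.length : Int) - size + 1) 1).any (fun i =>
          PySem.List.slice digits (some i) (some (i + size)) == pattern))

-- ===== PRECONDITION & SPEC =====
def Spec_has_sequence (chars : String) (length : Int) (out : Bool) : Prop := out = has_sequence_alt chars length
instance (chars : String) (length : Int) (out : Bool) : Decidable (Spec_has_sequence chars length out) := by unfold Spec_has_sequence; infer_instance

-- ===== CLAIM (what is proved, stated in full; the proofs are below) =====
def Claim_equal_has_sequence : Prop := ∀ (chars : String) (length : Int), Dom_has_sequence chars length → Spec_has_sequence chars length (has_sequence chars length)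

-- ===== LEMMAS AND PROOFS =====

-- every produced digit value lies in 0..9
lemma pvDigits_mem_bounds (chars : String) (x : Int) (hx : x ∈ pvDigits chars) :
    0 ≤ x ∧ x ≤ 9 := by
  unfold pvDigits at hx
  simp only [List.mem_map, List.mem_filter] at hx
  obtain ⟨c, ⟨-, hdig⟩, rfl⟩ := hx
  unfold PySem.Chars.isdigit at hdig
  simp only [Bool.and_eq_true, decide_eq_true_eq, Char.le_def] at hdig
  have h1 := UInt32.le_iff_toNat_le.mp hdig.1
  have h2 := UInt32.le_iff_toNat_le.mp hdig.2
  have h1' : 48 ≤ c.toNat := h1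
  have h2' : c.toNat ≤ 57 := h2
  omega

lemma pvDigits_getD_bounds (chars : String) (k : ℕ) (hk : k < (pvDigits chars).length) :
    0 ≤ (pvDigits chars).getD k 0 ∧ (pvDigits chars).getD k 0 ≤ 9 := by
  rw [List.getD_eq_getElem _ _ hk]
  exact pvDigits_mem_bounds chars _ (List.getElem_mem hk)

-- A's index loop over range(1, n) is the pairs loop over zip(digits, digits[1:]).
lemma zip_tail_eq_map_range (d : List Int) :
    d.zip d.tail = (List.range (d.length - 1)).map (fun k => (d.getD k 0, d.getD (k + 1) 0)) := by
  apply List.ext_getElem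
  · simp only [List.length_zip, List.length_tail, List.length_map, List.length_range]
    omega
  · intro k h1 h2
    have hk : k < d.length - 1 := by
      simpa [List.length_zip, List.length_tail] using h1
    have hk1 : k < d.length := by omega
    have hk2 : k + 1 < d.length := by omega
    simp [List.getElem_zip, List.getElem_tail, hk1, hk2]

lemma idx_fold_eq_pairs {σ : Type} (d : List Int) (f : σ → Int → Int → σ) (init : σ) :
    (PySem.List.pyRange 1 (d.length : Int) 1).foldl
      (fun st i => f st (PySem.List.pyGetD d (i - 1) 0) (PySem.List.pyGetD d i 0)) init
    = (d.zip d.tail).foldl (fun st p => f st p.1 p.2) init := by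
  rw [PySem.List.pyRange_one, List.foldl_map, zip_tail_eq_map_range, List.foldl_map]
  have hlen : ((d.length : Int) - 1).toNat = d.length - 1 := by omega
  rw [hlen]
  apply PySem.List.foldl_congr_mem
  intro st k hk
  have hk' : k < d.length - 1 := List.mem_range.mp hk
  have h1 : PySem.List.pyGetD d ((1 : Int) + k - 1) 0 = d.getD k 0 := by
    have : (1 : Int) + k - 1 = (k : Int) := by omega
    rw [this, PySem.List.pyGetD_natCast, List.getD_eq_getElem?_getD]
  have h2 : PySem.List.pyGetD d ((1 : Int) + k) 0 = d.getD (k + 1) 0 := by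
    have : (1 : Int) + k = ((k + 1 : Nat) : Int) := by omega
    rw [this, PySem.List.pyGetD_natCast, List.getD_eq_getElem?_getD]
  rw [h1, h2]

-- proof-only name for A's loop body
def stepA (length : Int) (st : Bool × Int) (p : Int × Int) : Bool × Int :=
  if st.1 then st
  else if p.2 == p.1 + 1 then
    (if st.2 + 1 ≥ length then (true, st.2 + 1) else (false, st.2 + 1))
  else (false, 1)

-- length of the maximal all-increment suffix of a pair list
def suffRun (ps : List (Int × Int)) : ℕ :=
  ps.foldl (fun s p => if p.2 == p.1 + 1 then s + 1 else 0) 0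

lemma suffRun_append (q : List (Int × Int)) (p : Int × Int) :
    suffRun (q ++ [p]) = if p.2 == p.1 + 1 then suffRun q + 1 else 0 := by
  simp [suffRun, List.foldl_append]

lemma suffRun_le_length (q : List (Int × Int)) : suffRun q ≤ q.length := by
  induction q using List.reverseRecOn with
  | nil => simp [suffRun]
  | append_singleton q p ih =>
    rw [suffRun_append]
    split_ifs
    · simpa using ih
    · simp

lemma suffRun_ge_iff (q : List (Int × Int)) (t : ℕ) :
    t ≤ suffRun q ↔ t ≤ q.length ∧ ∀ j < t,
      (q.getD (q.length - t + j) ((0:Int),(0:Int))).2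
        = (q.getD (q.length - t + j) ((0:Int),(0:Int))).1 + 1 := by
  induction q using List.reverseRecOn generalizing t with
  | nil =>
    cases t with
    | zero => simp
    | succ u => simp [suffRun]
  | append_singleton q p ih =>
    cases t with
    | zero => simp
    | succ u =>
      rw [suffRun_append]
      have hlen : (q ++ [p]).length = q.length + 1 := by simp
      by_cases hu : u ≤ q.length
      · have hidx : ∀ j ≤ u, (q ++ [p]).getD (q.length + 1 - (u + 1) + j) ((0:Int),(0:Int))
            = if j < u then q.getD (q.length - u + j) ((0:Int),(0:Int)) else p := by
          intro j hj
          have harith : q.length + 1 - (u + 1) + j = q.length - u + j := by omega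
          rw [harith]
          by_cases hju : j < u
          · rw [if_pos hju, List.getD_append _ _ _ _ (by omega)]
          · have harith2 : q.length - u + j = q.length := by omega
            rw [if_neg hju, harith2]
            simp [List.getD]
        by_cases hp : (p.2 == p.1 + 1) = true
        · rw [if_pos hp]
          have hpv : p.2 = p.1 + 1 := by simpa using hp
          constructor
          · intro h
            have h' := (ih u).mp (by omega)
            refine ⟨by simpa [hlen] using Nat.succ_le_succ hu, ?_⟩
            intro j hj
            rw [hlen, hidx j (by omega)]
            by_cases hju : j < u
            · rw [if_pos hju]; exact h'.2 j hju
            · rw [if_neg hju]; exact hpv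
          · intro ⟨_, h⟩
            have : u ≤ suffRun q := by
              apply (ih u).mpr
              refine ⟨hu, ?_⟩
              intro j hj
              have := h j (by omega)
              rw [hlen, hidx j (by omega), if_pos hj] at this
              exact this
            omega
        · rw [if_neg hp]
          constructor
          · omega
          · intro ⟨_, h⟩
            have := h u (by omega)
            rw [hlen, hidx u (le_refl u), if_neg (lt_irrefl u)] at this
            exact absurd (by simpa using this) (by simpa using hp)
      · constructor
        · intro h
          have := suffRun_le_length q
          split_ifs at h <;> omega
        · intro ⟨hb, _⟩
          rw [hlen] at hb
          omega

-- invariant of A's scan: the found flag says "some prefix already carries a long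
-- enough suffix run", the streak is that suffix-run length + 1 while not found
lemma scanA_inv (length : Int) (ps : List (Int × Int)) :
    (ps.foldl (stepA length) (false, 1)).1
      = decide (∃ m, m ≤ ps.length ∧ max length 2 ≤ (suffRun (ps.take m) : Int) + 1)
    ∧ ((ps.foldl (stepA length) (false, 1)).1 = false →
        (ps.foldl (stepA length) (false, 1)).2 = (suffRun ps : Int) + 1) := by
  induction ps using List.reverseRecOn with
  | nil =>
    refine ⟨?_, ?_⟩
    · simp only [List.foldl_nil]
      rw [eq_comm, decide_eq_false_iff_not]
      rintro ⟨m, -, h⟩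
      simp only [List.take_nil] at h
      have : suffRun ([] : List (Int × Int)) = 0 := rfl
      rw [this] at h
      omega
    · intro _
      have : suffRun ([] : List (Int × Int)) = 0 := rfl
      simp [this]
  | append_singleton q p ih =>
    rw [List.foldl_append, List.foldl_cons, List.foldl_nil]
    obtain ⟨ihf, ihs⟩ := ih
    set st := q.foldl (stepA length) (false, 1) with hst
    have htake : ∀ m, m ≤ q.length → (q ++ [p]).take m = q.take m := by
      intro m hm; rw [List.take_append_of_le_length hm]
    have htake' : (q ++ [p]).take (q.length + 1) = q ++ [p] := by
      apply List.take_of_length_le; simp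
    unfold stepA
    by_cases hf : st.1 = true
    · rw [if_pos hf]
      rw [hf] at ihf
      obtain ⟨m, hm, hcond⟩ : ∃ m, m ≤ q.length ∧ max length 2 ≤ (suffRun (q.take m) : Int) + 1 := by
        have := ihf.symm; rwa [decide_eq_true_iff] at this
      refine ⟨?_, ?_⟩
      · rw [hf, eq_comm, decide_eq_true_iff]
        exact ⟨m, by simp only [List.length_append, List.length_singleton]; omega,
          by rwa [htake m hm]⟩
      · intro hcontra; rw [hf] at hcontra; exact absurd hcontra (by simp)
    · have hf' : st.1 = false := by simpa using hf
      rw [if_neg hf]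
      have hs := ihs hf'
      rw [hf'] at ihf
      have hnone : ∀ m, m ≤ q.length → ¬ (max length 2 ≤ (suffRun (q.take m) : Int) + 1) := by
        intro m hm hcon
        have hcontra : decide (∃ m, m ≤ q.length ∧ max length 2 ≤ (suffRun (q.take m) : Int) + 1) = true := by
          rw [decide_eq_true_iff]; exact ⟨m, hm, hcon⟩
        rw [← ihf] at hcontra; simp at hcontra
      by_cases hp : (p.2 == p.1 + 1) = true
      · rw [if_pos hp, hs]
        have hsr : suffRun (q ++ [p]) = suffRun q + 1 := by rw [suffRun_append, if_pos hp]
        have hexist : (∃ m, m ≤ (q ++ [p]).length ∧ max length 2 ≤ (suffRun ((q ++ [p]).take m) : Int) + 1)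
            ↔ max length 2 ≤ (suffRun q : Int) + 2 := by
          constructor
          · rintro ⟨m, hm, hc⟩
            simp only [List.length_append, List.length_singleton] at hm
            by_cases hmq : m ≤ q.length
            · exact absurd hc (by rw [htake m hmq]; exact hnone m hmq)
            · have hme : m = q.length + 1 := by omega
              subst hme
              rw [htake', hsr] at hc
              push_cast at hc ⊢; omega
          · intro hc
            refine ⟨q.length + 1, by simp, ?_⟩
            rw [htake', hsr]
            push_cast at hc ⊢; omega
        by_cases hge : (suffRun q : Int) + 1 + 1 ≥ length
        · rw [if_pos hge]
          refine ⟨?_, by simp⟩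
          rw [eq_comm, decide_eq_true_iff, hexist]
          omega
        · rw [if_neg hge]
          refine ⟨?_, ?_⟩
          · rw [eq_comm, decide_eq_false_iff_not, hexist]; omega
          · intro _; rw [hsr]; push_cast; ring
      · rw [if_neg hp]
        have hsr : suffRun (q ++ [p]) = 0 := by rw [suffRun_append, if_neg hp]
        refine ⟨?_, ?_⟩
        · rw [eq_comm, decide_eq_false_iff_not]
          rintro ⟨m, hm, hc⟩
          simp only [List.length_append, List.length_singleton] at hm
          by_cases hmq : m ≤ q.length
          · exact absurd hc (by rw [htake m hmq]; exact hnone m hmq)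
          · have hme : m = q.length + 1 := by omega
            subst hme
            rw [htake', hsr] at hc
            omega
        · intro _; rw [hsr]; simp

-- entries of a prefix of the zip list are digit pairs
lemma take_zip_getD (d : List Int) (m k : ℕ) (hk : k < m) (hm : m ≤ (d.zip d.tail).length) :
    ((d.zip d.tail).take m).getD k ((0:Int),(0:Int))
      = (d.getD k 0, d.getD (k + 1) 0) := by
  have hlen : (d.zip d.tail).length = d.length - 1 := by
    simp [List.length_zip, List.length_tail]
  have hk' : k < d.length - 1 := by omega
  rw [List.getD, List.getElem?_take_of_lt hk, zip_tail_eq_map_range]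
  simp [hk']

lemma take_zip_length (d : List Int) (m : ℕ) (hm : m ≤ (d.zip d.tail).length) :
    ((d.zip d.tail).take m).length = m := by
  simp only [List.length_take]; omega

-- the scan existential over the zip list IS "a window of t increment steps exists in d"
lemma runs_iff (d : List Int) (t : ℕ) (ht : 1 ≤ t) :
    (∃ m, m ≤ (d.zip d.tail).length ∧ t ≤ suffRun ((d.zip d.tail).take m))
    ↔ (∃ i, i + t + 1 ≤ d.length ∧ ∀ j < t, d.getD (i + j + 1) 0 = d.getD (i + j) 0 + 1) := by
  have hlen : (d.zip d.tail).length = d.length - 1 := by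
    simp [List.length_zip, List.length_tail]
  constructor
  · rintro ⟨m, hm, hrun⟩
    obtain ⟨hb, hw⟩ := (suffRun_ge_iff _ t).mp hrun
    rw [take_zip_length d m hm] at hb hw
    refine ⟨m - t, by omega, ?_⟩
    intro j hj
    have := hw j hj
    rw [take_zip_getD d m (m - t + j) (by omega) hm] at this
    exact this
  · rintro ⟨i, hi, hw⟩
    refine ⟨i + t, by omega, ?_⟩
    apply (suffRun_ge_iff _ t).mpr
    rw [take_zip_length d (i + t) (by omega)]
    refine ⟨by omega, ?_⟩
    intro j hj
    rw [take_zip_getD d (i + t) (i + t - t + j) (by omega) (by omega)]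
    have harith : i + t - t + j = i + j := by omega
    rw [harith]
    exact hw j hj

-- along an increment window the digits are start + offset
lemma run_chain (d : List Int) (i t : ℕ)
    (h : ∀ j < t, d.getD (i + j + 1) 0 = d.getD (i + j) 0 + 1) :
    ∀ j ≤ t, d.getD (i + j) 0 = d.getD i 0 + j := by
  intro j
  induction j with
  | zero => intro _; simp
  | succ u ihu =>
    intro hu
    have h1 := h u (by omega)
    have h2 := ihu (by omega)
    have harith : i + (u + 1) = i + u + 1 := by omega
    rw [harith, h1, h2]
    push_cast; ring

-- ===== VERDICT (by name: the statement is the Claim_ definition above) =====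
theorem has_sequence_spec : Claim_equal_has_sequence := by
  intro chars length _
  unfold Spec_has_sequence has_sequence has_sequence_alt
  set d := pvDigits chars with hd
  by_cases hguard : (d.length : Int) < length
  · simp [hguard]
  · simp only [hguard, if_false]
    rw [idx_fold_eq_pairs d
      (fun (st : Bool × Int) prev curd =>
        if st.1 then st
        else if curd == prev + 1 then
          (if st.2 + 1 ≥ length then (true, st.2 + 1) else (false, st.2 + 1))
        else (false, 1)) (false, 1)]
    have hstep_eq : (fun (st : Bool × Int) (p : Int × Int) =>
        if st.1 then st
        else if p.2 == p.1 + 1 then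
          (if st.2 + 1 ≥ length then (true, st.2 + 1) else (false, st.2 + 1))
        else (false, 1)) = stepA length := rfl
    have hA := (scanA_inv length (d.zip d.tail)).1
    rw [hstep_eq, hA]
    set n := d.length with hn
    set t : ℕ := (max length 2 - 1).toNat with htdef
    have ht1 : 1 ≤ t := by omega
    have htc : (t : Int) = max length 2 - 1 := by omega
    have hEt : (∃ m, m ≤ (d.zip d.tail).length ∧ max length 2 ≤ (suffRun ((d.zip d.tail).take m) : Int) + 1)
        ↔ (∃ m, m ≤ (d.zip d.tail).length ∧ t ≤ suffRun ((d.zip d.tail).take m)) := by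
      constructor
      · rintro ⟨m, hm, hc⟩; exact ⟨m, hm, by omega⟩
      · rintro ⟨m, hm, hc⟩; exact ⟨m, hm, by omega⟩
    have hbnd := pvDigits_getD_bounds chars
    rw [← hd] at hbnd
    by_cases hbig : max length 2 > 10
    · rw [if_pos hbig]
      rw [decide_eq_false_iff_not, hEt, runs_iff d t ht1]
      rintro ⟨i, hi, hw⟩
      have hchain := run_chain d i t hw t (le_refl t)
      have hup := hbnd (i + t) (by omega)
      have hlo := hbnd i (by omega)
      omega
    · rw [if_neg hbig]
      rw [Bool.eq_iff_iff]
      simp only [decide_eq_true_iff, List.any_eq_true, PySem.List.mem_pyRange_one, beq_iff_eq]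
      rw [hEt, runs_iff d t ht1]
      set L : ℕ := (max length 2).toNat with hLdef
      have hLc : (L : Int) = max length 2 := by omega
      have hL2 : 2 ≤ L := by omega
      have hL10 : L ≤ 10 := by omega
      have htL : t = L - 1 := by omega
      have hslice : ∀ (i : ℕ), PySem.List.slice d (some (i : Int)) (some ((i : Int) + (L : Int)))
          = (d.drop i).take L := fun i => PySem.List.slice_natCast_add d i L
      have hpat : ∀ s : Int, PySem.List.pyRange s (s + max length 2) 1
          = (List.range L).map (fun k : ℕ => s + (k : Int)) := by
        intro s
        have harg : (s + max length 2 - s).toNat = L := by omega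
        rw [PySem.List.pyRange_one, harg]
      constructor
      · rintro ⟨i, hi, hw⟩
        have hw' : ∀ j < L - 1, d.getD (i + j + 1) 0 = d.getD (i + j) 0 + 1 := by
          rw [← htL]; exact hw
        have hchain := run_chain d i (L - 1) hw'
        have hiL : i + L ≤ n := by omega
        set s : Int := d.getD i 0 with hsdef
        have hs0 : 0 ≤ s := (hbnd i (by omega)).1
        have hstop : s + (L - 1 : ℕ) ≤ 9 := by
          have := hchain (L - 1) (le_refl _)
          have := (hbnd (i + (L - 1)) (by omega)).2
          omega
        refine ⟨s, ⟨hs0, by omega⟩, (i : Int), ⟨by omega, by omega⟩, ?_⟩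
        rw [← hLc, hslice i, hLc, hpat s]
        apply List.ext_getElem
        · simp only [List.length_take, List.length_drop, List.length_map, List.length_range]
          omega
        · intro k h1 h2
          simp only [List.length_map, List.length_range] at h2
          rw [List.getElem_take, List.getElem_drop]
          simp only [List.getElem_map, List.getElem_range]
          have := hchain k (by omega)
          rw [List.getD_eq_getElem _ _ (by omega : i + k < d.length)] at this
          rw [this]
      · rintro ⟨s, ⟨hs0, hs1⟩, i, ⟨hi0, hi1⟩, heq⟩
        set iN : ℕ := i.toNat with hiNdef
        have hic : (iN : Int) = i := by omega
        rw [← hic, ← hLc, hslice iN, hLc, hpat s] at heq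
        have hlen2 : ((d.drop iN).take L).length = min L (n - iN) := by
          simp only [List.length_take, List.length_drop, hn]
        have hlenpat : (((List.range L).map (fun k : ℕ => s + (k : Int)))).length = L := by simp
        have hiL : iN + L ≤ n := by
          have := congrArg List.length heq
          rw [hlen2, hlenpat] at this
          omega
        have hval : ∀ k < L, d.getD (iN + k) 0 = s + k := by
          intro k hk
          have h1 : ((d.drop iN).take L)[k]'(by rw [hlen2]; omega)
              = ((List.range L).map (fun j : ℕ => s + (j : Int)))[k]'(by rw [hlenpat]; omega) := by
            rw [List.getElem_of_eq heq]
          rw [List.getElem_take, List.getElem_drop] at h1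
          simp only [List.getElem_map, List.getElem_range] at h1
          rw [List.getD_eq_getElem _ _ (by omega : iN + k < d.length)]
          exact h1
        refine ⟨iN, by omega, ?_⟩
        intro j hj
        have ha := hval j (by omega)
        have hb' := hval (j + 1) (by omega)
        have harith : iN + (j + 1) = iN + j + 1 := by omega
        rw [harith] at hb'
        rw [ha, hb']
        push_cast; ring
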